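-- pv_equiv track=rewrite | github.com/729149195/DataDiagnosticPlatform | export_historical_errors.py | get_database_ranges
-- ===== SOURCE A (Python) =====
-- def get_database_ranges(start_shot, end_shot, batch_size=100):
--     """
--     根据炮号范围计算需要访问的数据库名称列表
--     数据库命名规则：DataDiagnosticPlatform_[range_start_range_end]
--
--     Args:
--         start_shot: 起始炮号
--         end_shot: 结束炮号
--         batch_size: 每个数据库包含的炮号数量（默认100）
--
--     Returns:
--         list: 包含(db_name, db_start, db_end, shots_in_range)的元组列表
--     """
--     databases = []
--
--     # 计算起始炮号对应的数据库起始范围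
--     start_db_range = (start_shot - 1) // batch_size * batch_size + 1
--
--     current_start = start_db_range
--     while current_start <= end_shot:
--         current_end = current_start + batch_size - 1
--         db_name = f"DataDiagnosticPlatform_[{current_start}_{current_end}]"
--
--         # 计算该数据库中实际需要导出的炮号范围
--         actual_start = max(current_start, start_shot)
--         actual_end = min(current_end, end_shot)
--
--         if actual_start <= actual_end:
--             shots_in_range = list(range(actual_start, actual_end + 1))
--             databases.append((db_name, current_start, current_end, shots_in_range))
--
--         current_start = current_end + 1
--
--     return databases
-- ===== SOURCE B (Python) =====
-- def get_database_ranges(start_shot, end_shot, batch_size=100):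
--     """Single pass over the shots themselves: group consecutive shots by their
--     database bucket key (shot-1)//batch_size, extending the last group or
--     opening a new one, instead of iterating over bucket boundaries and slicing."""
--     result = []
--     for shot in range(start_shot, end_shot + 1):
--         lo = (shot - 1) // batch_size * batch_size + 1
--         if result and result[-1][1] == lo:
--             result[-1][3].append(shot)
--         else:
--             hi = lo + batch_size - 1
--             result.append((f"DataDiagnosticPlatform_[{lo}_{hi}]", lo, hi, [shot]))
--     return result
-- ===== Notes on version B (the rewrite author's own statement) =====
-- stated objective: alternative
-- what changed: B makes a single pass over the shots themselves, grouping consecutive shots by their bucket key (shot-1)//batch_size (extending the last group or opening a new one), instead of A's while-loop over bucket boundaries that slices a sub-range per database.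
-- outside the precondition, e.g. on get_database_ranges(3, 3, -5): A returns [], B returns [('DataDiagnosticPlatform_[6_0]', 6, 0, [3])]; on get_database_ranges(1, 5, 0): A raises ZeroDivisionError, B raises ZeroDivisionError
import Mathlib
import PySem

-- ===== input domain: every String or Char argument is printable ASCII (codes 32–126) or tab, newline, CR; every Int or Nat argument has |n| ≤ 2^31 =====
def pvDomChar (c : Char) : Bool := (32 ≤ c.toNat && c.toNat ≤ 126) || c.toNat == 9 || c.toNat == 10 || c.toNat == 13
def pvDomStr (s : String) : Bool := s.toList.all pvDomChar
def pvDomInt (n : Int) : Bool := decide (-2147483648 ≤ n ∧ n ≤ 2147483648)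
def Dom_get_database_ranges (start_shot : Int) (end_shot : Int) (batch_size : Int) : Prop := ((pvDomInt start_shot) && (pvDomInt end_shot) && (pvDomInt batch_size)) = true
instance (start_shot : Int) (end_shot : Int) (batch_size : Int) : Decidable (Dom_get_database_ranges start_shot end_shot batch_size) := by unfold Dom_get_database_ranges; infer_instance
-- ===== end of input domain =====

-- B groups the shots in one pass by their bucket key instead of iterating over bucket
-- boundaries like A; same cost, different decomposition (objective: alternative).

-- ===== PORT A =====
-- f"DataDiagnosticPlatform_[{lo}_{hi}]"
def pvFmt (lo hi : Int) : String :=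
  "DataDiagnosticPlatform_[" ++ PySem.Int.toStr lo ++ "_" ++ PySem.Int.toStr hi ++ "]"

-- A's while loop; the fuel only makes the recursion total (each iteration with
-- batch_size ≥ 1 advances current_start by at least 1, so the fuel below suffices).
def pvLoopA (start_shot end_shot batch_size : Int) :
    Nat → Int → List (String × Int × Int × List Int) → List (String × Int × Int × List Int)
  | 0, _, acc => acc
  | Nat.succ f, current_start, acc =>
    if current_start ≤ end_shot then
      let current_end := current_start + batch_size - 1
      let db_name := pvFmt current_start current_end
      let actual_start := max current_start start_shot
      let actual_end := min current_end end_shot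
      let acc' := if actual_start ≤ actual_end then
          acc ++ [(db_name, current_start, current_end,
                   PySem.List.pyRange actual_start (actual_end + 1) 1)]
        else acc
      pvLoopA start_shot end_shot batch_size f (current_end + 1) acc'
    else acc

def get_database_ranges (start_shot : Int) (end_shot : Int) (batch_size : Int) :
    List (String × Int × Int × List Int) :=
  let start_db_range := PySem.Int.floordiv (start_shot - 1) batch_size * batch_size + 1
  pvLoopA start_shot end_shot batch_size (end_shot + 1 - start_db_range).toNat start_db_range []

-- ===== PORT B =====
-- one shot of Source B's loop body: extend the last group or open a new one
def pvStepB (batch_size : Int) (acc : List (String × Int × Int × List Int)) (shot : Int) :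
    List (String × Int × Int × List Int) :=
  let lo := PySem.Int.floordiv (shot - 1) batch_size * batch_size + 1
  match acc.getLast? with
  | some (name, l, h, shots) =>
    if l = lo then acc.dropLast ++ [(name, l, h, shots ++ [shot])]
    else acc ++ [(pvFmt lo (lo + batch_size - 1), lo, lo + batch_size - 1, [shot])]
  | none => acc ++ [(pvFmt lo (lo + batch_size - 1), lo, lo + batch_size - 1, [shot])]

def get_database_ranges_alt (start_shot : Int) (end_shot : Int) (batch_size : Int) :
    List (String × Int × Int × List Int) :=
  (PySem.List.pyRange start_shot (end_shot + 1) 1).foldl (pvStepB batch_size) []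

-- ===== PRECONDITION & SPEC =====
-- Pre_ excludes batch_size ≤ 0: there Python A raises ZeroDivisionError (batch_size = 0)
-- or loops forever on almost all inputs, and the few [] it still returns (the loop guard
-- accidentally failing at once, e.g. (3, 3, -5)) are an artefact of a nonsensical batch size.
def Pre_get_database_ranges (start_shot : Int) (end_shot : Int) (batch_size : Int) : Prop :=
  1 ≤ batch_size
instance (start_shot : Int) (end_shot : Int) (batch_size : Int) : Decidable (Pre_get_database_ranges start_shot end_shot batch_size) := by unfold Pre_get_database_ranges; infer_instance
def pvWitness_get_database_ranges : Int × Int × Int := (95, 212, 100)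

def Spec_get_database_ranges (start_shot : Int) (end_shot : Int) (batch_size : Int) (out : List (String × Int × Int × List Int)) : Prop := out = get_database_ranges_alt start_shot end_shot batch_size
instance (start_shot : Int) (end_shot : Int) (batch_size : Int) (out : List (String × Int × Int × List Int)) : Decidable (Spec_get_database_ranges start_shot end_shot batch_size out) := by unfold Spec_get_database_ranges; infer_instance

-- ===== CLAIM (what is proved, stated in full; the proofs are below) =====
def Claim_equal_get_database_ranges : Prop := ∀ (start_shot : Int) (end_shot : Int) (batch_size : Int), Dom_get_database_ranges start_shot end_shot batch_size → Pre_get_database_ranges start_shot end_shot batch_size → Spec_get_database_ranges start_shot end_shot batch_size (get_database_ranges start_shot end_shot batch_size)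

-- ===== LEMMAS AND PROOFS =====

-- the database entry for bucket k, with shots clipped to [start_shot, m]
def pvEntry (s b m k : Int) : String × Int × Int × List Int :=
  (pvFmt (k * b + 1) (k * b + b), k * b + 1, k * b + b,
   PySem.List.pyRange (max (k * b + 1) s) (min (k * b + b) m + 1) 1)

-- floor-division bracket for the bucket key of x: key*b ≤ x-1 < key*b + b
theorem pvKeyBounds (x b : Int) (hb : 0 < b) :
    PySem.Int.floordiv (x - 1) b * b ≤ x - 1 ∧
      x - 1 < PySem.Int.floordiv (x - 1) b * b + b := by
  have h := (PySem.Int.floordiv_eq_iff_of_pos (a := x - 1) (b := b) hb).mp rfl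
  have he : (PySem.Int.floordiv (x - 1) b + 1) * b = PySem.Int.floordiv (x - 1) b * b + b := by ring
  exact ⟨h.1, by linarith [h.2]⟩

theorem pvKeyEq (x b k : Int) (hb : 0 < b) (h1 : k * b ≤ x - 1) (h2 : x - 1 < k * b + b) :
    PySem.Int.floordiv (x - 1) b = k := by
  rw [PySem.Int.floordiv_eq_iff_of_pos hb]
  have he : (k + 1) * b = k * b + b := by ring
  exact ⟨h1, by linarith⟩

theorem pvLoopA_of_gt (s e b : Int) (f : Nat) (cur : Int) (acc : List (String × Int × Int × List Int))
    (h : e < cur) : pvLoopA s e b f cur acc = acc := by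
  cases f with
  | zero => rfl
  | succ f => simp [pvLoopA, not_le.mpr h]

theorem pvLoopA_char (s e b : Int) (hb : 0 < b) (hse : s ≤ e) :
    ∀ (f : Nat) (k : Int), PySem.Int.floordiv (s - 1) b ≤ k → s ≤ k * b + b →
      e + 1 - (k * b + 1) ≤ (f : Int) →
      ∀ acc, pvLoopA s e b f (k * b + 1) acc =
        acc ++ (PySem.List.pyRange k (PySem.Int.floordiv (e - 1) b + 1) 1).map (pvEntry s b e) := by
  intro f
  induction f with
  | zero =>
    intro k _ _ hf acc
    have hke : PySem.Int.floordiv (e - 1) b < k := by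
      rw [PySem.Int.floordiv_lt_iff_lt_mul hb]
      simp only [Nat.cast_zero] at hf
      linarith
    rw [PySem.List.pyRange_one_eq_nil (by omega)]
    simp [pvLoopA]
  | succ f ih =>
    intro k hks hsk hf acc
    by_cases hcur : k * b + 1 ≤ e
    · have hkke : k ≤ PySem.Int.floordiv (e - 1) b := by
        rw [PySem.Int.le_floordiv_iff_mul_le hb]; omega
      have hfilter : max (k * b + 1) s ≤ min (k * b + 1 + b - 1) e := by
        simp only [max_le_iff, le_min_iff]
        refine ⟨⟨by linarith, by linarith⟩, by linarith, by linarith⟩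
      have hnext : k * b + 1 + b - 1 + 1 = (k + 1) * b + 1 := by ring
      have step : pvLoopA s e b (Nat.succ f) (k * b + 1) acc =
          pvLoopA s e b f ((k + 1) * b + 1)
            (acc ++ [(pvFmt (k * b + 1) (k * b + 1 + b - 1), k * b + 1, k * b + 1 + b - 1,
              PySem.List.pyRange (max (k * b + 1) s) (min (k * b + 1 + b - 1) e + 1) 1)]) := by
        simp only [pvLoopA, if_pos hcur, if_pos hfilter, hnext]
      rw [step, ih (k + 1) (by linarith)
            (by have he : (k + 1) * b + b = k * b + b + b := by ring
                linarith)
            (by push_cast at hf ⊢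
                have he : (k + 1) * b + 1 = k * b + 1 + b := by ring
                linarith) _]
      rw [PySem.List.pyRange_one_cons (a := k)
            (b := PySem.Int.floordiv (e - 1) b + 1) (by omega), List.map_cons]
      have hent : pvEntry s b e k = (pvFmt (k * b + 1) (k * b + 1 + b - 1), k * b + 1,
          k * b + 1 + b - 1, PySem.List.pyRange (max (k * b + 1) s) (min (k * b + 1 + b - 1) e + 1) 1) := by
        simp only [pvEntry]
        have : k * b + 1 + b - 1 = k * b + b := by ring
        rw [this]
      rw [← hent]
      simp
    · have hke : PySem.Int.floordiv (e - 1) b < k := by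
        rw [PySem.Int.floordiv_lt_iff_lt_mul hb]; linarith
      rw [pvLoopA_of_gt s e b _ _ _ (by linarith)]
      rw [PySem.List.pyRange_one_eq_nil (by omega)]
      simp

-- B's loop body when the accumulator ends with a group (name, l, h, shots)
theorem pvStepB_concat (b : Int) (acc : List (String × Int × Int × List Int))
    (name : String) (l h : Int) (shots : List Int) (shot : Int) :
    pvStepB b (acc ++ [(name, l, h, shots)]) shot =
      (if l = PySem.Int.floordiv (shot - 1) b * b + 1 then
        acc ++ [(name, l, h, shots ++ [shot])]
      else (acc ++ [(name, l, h, shots)]) ++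
        [(pvFmt (PySem.Int.floordiv (shot - 1) b * b + 1)
                (PySem.Int.floordiv (shot - 1) b * b + 1 + b - 1),
          PySem.Int.floordiv (shot - 1) b * b + 1,
          PySem.Int.floordiv (shot - 1) b * b + 1 + b - 1, [shot])]) := by
  simp only [pvStepB, List.getLast?_concat, List.dropLast_concat]

-- B's fold over the shots seen so far yields one entry per bucket key, clipped at m
theorem pvFoldB_char (s b : Int) (hb : 0 < b) :
    ∀ (m : Int), s ≤ m →
      (PySem.List.pyRange s (m + 1) 1).foldl (pvStepB b) [] =
        (PySem.List.pyRange (PySem.Int.floordiv (s - 1) b)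
          (PySem.Int.floordiv (m - 1) b + 1) 1).map (pvEntry s b m) := by
  intro m hm
  induction m, hm using Int.le_induction with
  | base =>
    obtain ⟨hks1, hks2⟩ := pvKeyBounds s b hb
    rw [PySem.List.pyRange_one_singleton, PySem.List.pyRange_one_singleton]
    simp only [List.foldl, List.map, pvStepB, pvEntry, List.getLast?]
    have h1 : max (PySem.Int.floordiv (s - 1) b * b + 1) s = s := by omega
    have h2 : min (PySem.Int.floordiv (s - 1) b * b + b) s = s := by omega
    have h3 : PySem.Int.floordiv (s - 1) b * b + 1 + b - 1
        = PySem.Int.floordiv (s - 1) b * b + b := by ring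
    rw [h1, h2, h3, PySem.List.pyRange_one_singleton]
    simp
  | succ m hm ih =>
    obtain ⟨hks1, hks2⟩ := pvKeyBounds s b hb
    obtain ⟨hkm1b, hkm2b⟩ := pvKeyBounds m b hb
    set ks := PySem.Int.floordiv (s - 1) b with hksdef
    set km := PySem.Int.floordiv (m - 1) b with hkmdef
    have hksm : ks ≤ km := by
      rw [hkmdef, PySem.Int.le_floordiv_iff_mul_le hb]; omega
    rw [show m + 1 + 1 = (m + 1) + 1 from rfl,
        PySem.List.pyRange_one_succ_right (by omega), List.foldl_append, ih]
    have hsplit : PySem.List.pyRange ks (km + 1) 1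
        = PySem.List.pyRange ks km 1 ++ [km] := PySem.List.pyRange_one_succ_right (by omega)
    have hunf : pvEntry s b m km = (pvFmt (km * b + 1) (km * b + b), km * b + 1, km * b + b,
        PySem.List.pyRange (max (km * b + 1) s) (min (km * b + b) m + 1) 1) := rfl
    have hmapeq : (PySem.List.pyRange ks km 1).map (pvEntry s b m)
        = (PySem.List.pyRange ks km 1).map (pvEntry s b (m + 1)) := by
      apply List.map_congr_left
      intro k hk
      rw [PySem.List.mem_pyRange_one] at hk
      have hkb : k * b + b ≤ km * b := by
        have h := mul_le_mul_of_nonneg_right (show k + 1 ≤ km by omega) (show (0:Int) ≤ b by omega)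
        have he : (k + 1) * b = k * b + b := by ring
        linarith
      simp only [pvEntry]
      have h1 : min (k * b + b) m = k * b + b := by omega
      have h2 : min (k * b + b) (m + 1) = k * b + b := by omega
      rw [h1, h2]
    by_cases hsame : m + 1 ≤ km * b + b
    · -- shot m+1 stays in bucket km: the last group is extended
      have hkey : PySem.Int.floordiv (m + 1 - 1) b = km :=
        pvKeyEq (m + 1) b km hb (by omega) (by omega)
      rw [hkey, hsplit]
      simp only [List.foldl, List.map_append, List.map_cons, List.map_nil]
      rw [hunf, pvStepB_concat, if_pos (by rw [hkey])]
      have hgrow : PySem.List.pyRange (max (km * b + 1) s) (m + 1 + 1) 1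
          = PySem.List.pyRange (max (km * b + 1) s) (m + 1) 1 ++ [m + 1] := by
        rw [PySem.List.pyRange_one_succ_right]
        simp only [max_le_iff]; omega
      have hlastentry : pvEntry s b (m + 1) km
          = (pvFmt (km * b + 1) (km * b + b), km * b + 1, km * b + b,
             PySem.List.pyRange (max (km * b + 1) s) (m + 1) 1 ++ [m + 1]) := by
        simp only [pvEntry]
        have h4 : min (km * b + b) (m + 1) = m + 1 := by omega
        rw [h4, hgrow]
      have h3 : min (km * b + b) m = m := by omega
      rw [h3, ← hmapeq, hlastentry]
    · -- shot m+1 opens bucket km+1; here m = km*b + b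
      have hmeq : m = km * b + b := by omega
      have hkey : PySem.Int.floordiv (m + 1 - 1) b = km + 1 := by
        apply pvKeyEq (m + 1) b (km + 1) hb
        · have : (km + 1) * b = km * b + b := by ring
          omega
        · have : (km + 1) * b + b = km * b + b + b := by ring
          omega
      rw [hkey, hsplit,
          PySem.List.pyRange_one_succ_right (a := ks) (b := km + 1) (by omega), hsplit]
      simp only [List.foldl, List.map_append, List.map_cons, List.map_nil]
      rw [hunf, pvStepB_concat,
          if_neg (by rw [hkey]
                     have he : (km + 1) * b = km * b + b := by ring
                     omega)]
      have hkmeq : pvEntry s b m km = pvEntry s b (m + 1) km := by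
        simp only [pvEntry]
        have h1 : min (km * b + b) m = m := by omega
        have h2 : min (km * b + b) (m + 1) = m := by omega
        rw [h1, h2]
      have hnew : pvEntry s b (m + 1) (km + 1) =
          (pvFmt (PySem.Int.floordiv (m + 1 - 1) b * b + 1)
                 (PySem.Int.floordiv (m + 1 - 1) b * b + 1 + b - 1),
           PySem.Int.floordiv (m + 1 - 1) b * b + 1,
           PySem.Int.floordiv (m + 1 - 1) b * b + 1 + b - 1, [m + 1]) := by
        rw [hkey]
        simp only [pvEntry]
        have h1 : max ((km + 1) * b + 1) s = m + 1 := by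
          have he : (km + 1) * b = km * b + b := by ring
          omega
        have h3 : (km + 1) * b + 1 = m + 1 := by
          have he : (km + 1) * b = km * b + b := by ring
          omega
        have h2 : min ((km + 1) * b + b) (m + 1) = m + 1 := by
          have he : (km + 1) * b + b = km * b + b + b := by ring
          omega
        rw [h1, h2, show (km + 1) * b + b = (km + 1) * b + 1 + b - 1 by ring, h3,
            PySem.List.pyRange_one_singleton]
      rw [hnew, ← hkmeq, hunf, ← hmapeq]

-- ===== VERDICT (by name: the statement is the Claim_ definition above) =====
theorem get_database_ranges_spec : Claim_equal_get_database_ranges := by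
  intro s e b _ hb
  have hb' : (0 : Int) < b := hb
  unfold Spec_get_database_ranges get_database_ranges get_database_ranges_alt
  by_cases hse : s ≤ e
  · obtain ⟨hks1, hks2⟩ := pvKeyBounds s b hb'
    rw [pvLoopA_char s e b hb' hse _ (PySem.Int.floordiv (s - 1) b) le_rfl (by omega)
        (by rw [Int.toNat_of_nonneg (by omega)]) []]
    rw [pvFoldB_char s b hb' e hse]
    simp
  · -- empty or reversed range: both sides are []
    obtain ⟨hks1, hks2⟩ := pvKeyBounds s b hb'
    rw [PySem.List.pyRange_one_eq_nil (by omega)]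
    simp only [List.foldl_nil]
    set ks := PySem.Int.floordiv (s - 1) b with hksdef
    by_cases hcur : ks * b + 1 ≤ e
    · -- the loop runs once, the slice is empty, then current_start jumps past e
      have hfuel : 1 ≤ (e + 1 - (ks * b + 1)).toNat := by omega
      obtain ⟨f, hfeq⟩ : ∃ f, (e + 1 - (ks * b + 1)).toNat = Nat.succ f :=
        ⟨(e + 1 - (ks * b + 1)).toNat - 1, by omega⟩
      rw [hfeq]
      have hfilter : ¬ (max (ks * b + 1) s ≤ min (ks * b + 1 + b - 1) e) := by
        intro hcon
        exact hse (le_trans (le_max_right _ _) (le_trans hcon (min_le_right _ _)))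
      have step : pvLoopA s e b (Nat.succ f) (ks * b + 1) [] =
          pvLoopA s e b f (ks * b + 1 + b - 1 + 1) [] := by
        simp only [pvLoopA, if_pos hcur, if_neg hfilter]
      rw [step, pvLoopA_of_gt s e b f _ [] (by omega)]
    · rw [pvLoopA_of_gt s e b _ _ [] (by omega)]
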